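-- pv_equiv track=rewrite | github.com/folkertvanheusden/DotXT | tests/flags.py | flags_rol
-- ===== SOURCE A (Python) =====
-- def flags_rol(val: int, count: int, carry: int, width: int, set_flag_o: bool):
--     check_bit = 32768 if width == 16 else 128
--
--     for i in range(0, count):
--         carry = True if val & check_bit else False
--         val <<= 1
--         val |= carry
--         val &= 0xff if width == 8 else 65535
--
--     flag_o = False
--     mask = ~0
--
--     if set_flag_o:
--         flag_o = carry ^ (True if val & check_bit else False)
--     else:
--         mask = ~2048
--
--     flags = (1 if carry else 0) + (2048 if flag_o else 0)
--
--     return (val, flags, mask & 0xffff)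
-- ===== SOURCE B (Python) =====
-- def flags_rol(val, count, carry, width, set_flag_o):
--     size = 256 if width == 8 else 65536
--     tshift = 32768 if width == 16 else 128
--     # the loop state is periodic (period 16) once past a 32-step transient,
--     # so only an O(1) number of steps is ever executed
--     n = count if count <= 32 else 32 + (count - 32) % 16
--     v, c = val, carry
--     for _ in range(n):
--         c = (v // tshift) % 2
--         v = (2 * v + c) % size
--     hi = (v // tshift) % 2
--     flags = (1 if c else 0) + (2048 if set_flag_o and c != hi else 0)
--     return (v, flags, 65535 if set_flag_o else 63487)
-- ===== Notes on version B (the rewrite author's own statement) =====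
-- stated objective: faster
-- what changed: B replaces A's O(count) bit-twiddling rotate loop by reducing count modulo the state's period (16, after a 32-step transient) and stepping with plain floor-division/mod arithmetic, so at most 47 steps run regardless of count.
import Mathlib
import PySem

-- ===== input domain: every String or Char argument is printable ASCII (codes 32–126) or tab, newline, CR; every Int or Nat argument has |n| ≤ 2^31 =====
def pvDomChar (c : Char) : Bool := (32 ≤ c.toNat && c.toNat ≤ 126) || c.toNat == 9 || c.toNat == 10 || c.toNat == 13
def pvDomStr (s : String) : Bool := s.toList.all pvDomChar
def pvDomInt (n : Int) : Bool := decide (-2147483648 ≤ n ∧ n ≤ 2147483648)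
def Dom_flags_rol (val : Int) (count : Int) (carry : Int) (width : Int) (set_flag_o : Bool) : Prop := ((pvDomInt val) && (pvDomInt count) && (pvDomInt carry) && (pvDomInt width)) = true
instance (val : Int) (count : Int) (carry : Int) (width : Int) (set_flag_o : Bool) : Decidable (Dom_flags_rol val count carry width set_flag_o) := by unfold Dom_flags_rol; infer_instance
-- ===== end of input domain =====

-- B replaces A's O(count) rotate loop by an O(1) computation: the loop state is periodic
-- (period 16 past a 32-step transient), so B reduces count modulo the period and steps with
-- plain floor-division/mod arithmetic instead of bit operations.


-- ===== PORT A =====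
-- literal transliteration of A: an O(count) loop; each pass tests the top bit (`val & check_bit`),
-- shifts left, ORs the carry in and masks.
def flags_rol (val : Int) (count : Int) (carry : Int) (width : Int) (set_flag_o : Bool) : List Int :=
  let check_bit : Int := if width = 16 then 32768 else 128
  let st : Int × Int :=
    (PySem.List.pyRange 0 count 1).foldl (fun (s : Int × Int) (_ : Int) =>
      (PySem.Int.band (PySem.Int.bor (s.1 <<< (1:Nat)) (if PySem.Int.band s.1 check_bit ≠ 0 then 1 else 0))
         (if width = 8 then 255 else 65535),
       if PySem.Int.band s.1 check_bit ≠ 0 then 1 else 0)) (val, carry)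
  let val : Int := st.1
  let carry : Int := st.2
  let flag_o : Int := 0
  let mask : Int := Int.not 0
  let fm : Int × Int :=
    if set_flag_o then
      (PySem.Int.bxor carry (if PySem.Int.band val check_bit ≠ 0 then 1 else 0), mask)
    else (flag_o, Int.not 2048)
  let flags : Int := (if carry ≠ 0 then 1 else 0) + (if fm.1 ≠ 0 then 2048 else 0)
  [val, flags, PySem.Int.band fm.2 65535]

-- ===== PORT B =====
-- transliteration of B (Source B): count reduced modulo the period, arithmetic step, ≤ 47 iterations.
def flags_rol_alt (val : Int) (count : Int) (carry : Int) (width : Int) (set_flag_o : Bool) : List Int :=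
  let size : Int := if width = 8 then 256 else 65536
  let tshift : Int := if width = 16 then 32768 else 128
  let n : Int := if count ≤ 32 then count else 32 + PySem.Int.mod (count - 32) 16
  let st : Int × Int :=
    (List.range n.toNat).foldl (fun (s : Int × Int) (_ : Nat) =>
      (PySem.Int.mod (2 * s.1 + PySem.Int.mod (PySem.Int.floordiv s.1 tshift) 2) size,
       PySem.Int.mod (PySem.Int.floordiv s.1 tshift) 2)) (val, carry)
  let hi : Int := PySem.Int.mod (PySem.Int.floordiv st.1 tshift) 2
  let flags : Int := (if st.2 ≠ 0 then 1 else 0) + (if set_flag_o ∧ st.2 ≠ hi then 2048 else 0)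
  [st.1, flags, if set_flag_o then 65535 else 63487]

-- ===== PRECONDITION & SPEC =====
def Spec_flags_rol (val : Int) (count : Int) (carry : Int) (width : Int) (set_flag_o : Bool) (out : List Int) : Prop := out = flags_rol_alt val count carry width set_flag_o
instance (val : Int) (count : Int) (carry : Int) (width : Int) (set_flag_o : Bool) (out : List Int) : Decidable (Spec_flags_rol val count carry width set_flag_o out) := by unfold Spec_flags_rol; infer_instance

-- ===== CLAIM (what is proved, stated in full; the proofs are below) =====
def Claim_equal_flags_rol : Prop := ∀ (val : Int) (count : Int) (carry : Int) (width : Int) (set_flag_o : Bool), Dom_flags_rol val count carry width set_flag_o → Spec_flags_rol val count carry width set_flag_o (flags_rol val count carry width set_flag_o)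

-- ===== LEMMAS AND PROOFS =====

-- A's loop body, with the width-dependent constants as parameters.
def stepA (cb m : Int) (s : Int × Int) : Int × Int :=
  (PySem.Int.band (PySem.Int.bor (s.1 <<< (1:Nat)) (if PySem.Int.band s.1 cb ≠ 0 then 1 else 0)) m,
   if PySem.Int.band s.1 cb ≠ 0 then 1 else 0)

-- B's loop body, with the width-dependent constants as parameters.
def stepF (tsh size : Int) (s : Int × Int) : Int × Int :=
  (PySem.Int.mod (2 * s.1 + PySem.Int.mod (PySem.Int.floordiv s.1 tsh) 2) size,
   PySem.Int.mod (PySem.Int.floordiv s.1 tsh) 2)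

-- the value component of the step, on Nat (the state is in [0, 2^K) after one step)
def gN (S K : Nat) (v : Nat) : Nat := (2 * v + v / 2 ^ S % 2) % 2 ^ K

lemma loopA (cb m : Int) (x : Int × Int) (l : List Int) :
    List.foldl (fun (s : Int × Int) (_ : Int) =>
      (PySem.Int.band (PySem.Int.bor (s.1 <<< (1:Nat)) (if PySem.Int.band s.1 cb ≠ 0 then 1 else 0)) m,
       if PySem.Int.band s.1 cb ≠ 0 then 1 else 0)) x l = (stepA cb m)^[l.length] x :=
  List.foldl_const _ _ _

lemma loopB (tsh size : Int) (x : Int × Int) (l : List Nat) :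
    List.foldl (fun (s : Int × Int) (_ : Nat) =>
      (PySem.Int.mod (2 * s.1 + PySem.Int.mod (PySem.Int.floordiv s.1 tsh) 2) size,
       PySem.Int.mod (PySem.Int.floordiv s.1 tsh) 2)) x l = (stepF tsh size)^[l.length] x :=
  List.foldl_const _ _ _

-- 2*n ||| 1 = 2*n + 1
lemma two_mul_lor_one (n : Nat) : 2 * n ||| 1 = 2 * n + 1 := by
  apply Nat.eq_of_testBit_eq
  intro i
  cases i with
  | zero => simp [Nat.testBit_eq_decide_div_mod_eq]
  | succ i =>
    rw [Nat.testBit_lor, Nat.testBit_succ, Nat.testBit_succ, Nat.testBit_succ]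
    have h1 : (1:Nat) / 2 = 0 := by norm_num
    have h2 : 2 * n / 2 = n := by omega
    have h3 : (2 * n + 1) / 2 = n := by omega
    rw [h1, h2, h3]
    simp [Nat.testBit_eq_decide_div_mod_eq]

-- a bit strictly below the mod cut is unchanged by the mod
lemma bit_mod_pow (v A B : Nat) (h : B < A) : v % 2 ^ A / 2 ^ B % 2 = v / 2 ^ B % 2 := by
  conv_rhs => rw [← Nat.div_add_mod v (2 ^ A)]
  rw [show 2 ^ A = 2 ^ (A - B) * 2 ^ B by rw [← pow_add]; congr 1; omega]
  rw [show 2 ^ (A - B) * 2 ^ B * (v / (2 ^ (A - B) * 2 ^ B)) + v % (2 ^ (A - B) * 2 ^ B)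
      = v % (2 ^ (A - B) * 2 ^ B) + (2 * (2 ^ (A - B - 1) * (v / (2 ^ (A - B) * 2 ^ B)))) * 2 ^ B by
        rw [show 2 ^ (A - B) = 2 * 2 ^ (A - B - 1) by rw [← pow_succ']; congr 1; omega]; ring]
  rw [Nat.add_mul_div_right _ _ (pow_pos (by norm_num : (0:Nat) < 2) B)]
  omega

-- floor division and remainder of a negative integer by a positive one, in Nat terms
lemma neg_ediv_emod (y N : Nat) (hN : 0 < N) :
    (-(↑y:Int) - 1) / ↑N = -↑(y / N) - 1 ∧ (-(↑y:Int) - 1) % ↑N = ↑(N - 1 - y % N) := by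
  have hdmZ : ((N : Nat) : Int) * ↑(y / N) + ↑(y % N) = ↑y := by
    exact_mod_cast Nat.div_add_mod y N
  have hlt : y % N < N := Nat.mod_lt _ hN
  exact (Int.ediv_emod_unique (a := -↑y - 1) (b := ↑N)
      (q := -↑(y / N) - 1) (r := ↑(N - 1 - y % N)) (by exact_mod_cast hN)).mpr
    ⟨by rw [show ((N - 1 - y % N : Nat) : Int) = ↑N - 1 - ↑(y % N) by omega]
        linear_combination (-1 : Int) * hdmZ,
     by positivity, by exact_mod_cast Int.ofNat_lt.mpr (by omega)⟩

-- Python `x & mask` for negative x, mask = 2^K - 1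
lemma bandneg (K : Nat) (y : Nat) :
    PySem.Int.band (-↑y - 1) ((2 ^ K - 1 : Nat) : Int) = ↑((2 ^ K - 1) - (y &&& (2 ^ K - 1))) := by
  unfold PySem.Int.band
  rw [if_neg (by omega), if_pos (by positivity)]
  rw [show (-(-(↑y:Int) - 1) - 1) = ↑y by ring, Int.toNat_natCast, Int.toNat_natCast, Nat.land_comm]

-- Python `x | 1` for negative even-ish x
lemma borneg1 (y : Nat) : PySem.Int.bor (-↑(2 * y + 1) - 1) 1 = -↑(2 * y + 1 - 1) - 1 := by
  unfold PySem.Int.bor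
  rw [if_neg (by omega), if_pos (by norm_num)]
  rw [show (-(-(↑(2 * y + 1):Int) - 1) - 1) = ↑(2 * y + 1) by ring, Int.toNat_natCast,
    show ((1:Int).toNat) = 1 from rfl, Nat.and_one_is_mod]
  norm_num

-- Python truthiness of `v & 2^S` equals the arithmetic bit `(v // 2^S) % 2`
lemma bitsel (S : Nat) (v : Int) :
    (if PySem.Int.band v (2 ^ S : Int) ≠ 0 then (1 : Int) else 0)
      = PySem.Int.mod (PySem.Int.floordiv v (2 ^ S : Int)) 2 := by
  have hcast : ((2:Int) ^ S) = ((2 ^ S : Nat) : Int) := by push_cast; ring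
  rw [hcast]
  rcases le_or_gt 0 v with hv | hv
  · obtain ⟨m, rfl⟩ : ∃ m : Nat, v = ↑m := ⟨v.toNat, by omega⟩
    rw [PySem.Int.band_natCast, PySem.Int.floordiv_natCast,
      show (2:Int) = ((2:Nat):Int) by norm_num, PySem.Int.mod_natCast,
      Nat.and_two_pow, Nat.testBit_eq_decide_div_mod_eq]
    by_cases hb : m / 2 ^ S % 2 = 1
    · have hpos : (0:Nat) < 2 ^ S := pow_pos (by norm_num) S
      simp [hb]
    · have h0 : m / 2 ^ S % 2 = 0 := by omega
      simp [h0]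
  · obtain ⟨m, rfl⟩ : ∃ m : Nat, v = -↑m - 1 := ⟨(-v-1).toNat, by omega⟩
    have hb : PySem.Int.band (-↑m - 1) ((2 ^ S : Nat) : Int) = ↑(2 ^ S - (m &&& 2 ^ S)) := by
      unfold PySem.Int.band
      rw [if_neg (by omega), if_pos (by positivity)]
      rw [show (-(-(↑m:Int) - 1) - 1) = ↑m by ring]
      rw [Int.toNat_natCast, Int.toNat_natCast, Nat.land_comm]
    have hfd : PySem.Int.floordiv (-↑m - 1) ((2 ^ S : Nat) : Int) = -↑(m / 2 ^ S) - 1 := by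
      rw [PySem.Int.floordiv_eq_ediv_of_pos (by positivity)]
      exact (neg_ediv_emod m (2 ^ S) (pow_pos (by norm_num) S)).1
    rw [hb, hfd, PySem.Int.mod_eq_emod_of_pos (by norm_num)]
    rw [Nat.and_two_pow, Nat.testBit_eq_decide_div_mod_eq]
    by_cases hq : m / 2 ^ S % 2 = 1
    · simp only [hq, decide_true, Bool.toNat_true, one_mul, Nat.sub_self, Nat.cast_zero]
      omega
    · have h0 : m / 2 ^ S % 2 = 0 := by omega
      have hpos : (0:Nat) < 2 ^ S := pow_pos (by norm_num) S
      simp only [hq, decide_false, Bool.toNat_false, zero_mul, Nat.sub_zero]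
      rw [if_pos (Nat.cast_ne_zero.mpr hpos.ne')]
      omega

-- ((v << 1) | c) & (2^K - 1) = (2v + c) mod 2^K for c ∈ {0, 1}
lemma maskstep (K : Nat) (v c : Int) (hc : c = 0 ∨ c = 1) :
    PySem.Int.band (PySem.Int.bor (v <<< (1:Nat)) c) ((2 ^ K : Int) - 1)
      = PySem.Int.mod (2 * v + c) (2 ^ K : Int) := by
  have h1 : (1:Nat) ≤ 2 ^ K := Nat.one_le_two_pow
  rw [Int.shiftLeft_eq, show v * 2 ^ 1 = 2 * v by ring,
    show ((2:Int) ^ K - 1) = ((2 ^ K - 1 : Nat) : Int) by push_cast [h1]; ring,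
    PySem.Int.mod_eq_emod_of_pos (b := (2:Int) ^ K) (by positivity),
    show ((2:Int) ^ K) = ((2 ^ K : Nat) : Int) by push_cast; ring]
  rcases le_or_gt 0 v with hv | hv
  · obtain ⟨m, rfl⟩ : ∃ m : Nat, v = ↑m := ⟨v.toNat, by omega⟩
    rcases hc with rfl | rfl
    · rw [PySem.Int.bor_zero, show 2 * (↑m:Int) + 0 = ((2 * m : Nat) : Int) by push_cast; ring,
        show 2 * (↑m:Int) = ((2 * m : Nat) : Int) by push_cast; ring,
        PySem.Int.band_natCast, Nat.and_two_pow_sub_one_eq_mod]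
      norm_cast
    · rw [show (1:Int) = ((1:Nat):Int) by norm_num,
        show 2 * (↑m:Int) = ((2 * m : Nat) : Int) by push_cast; ring,
        PySem.Int.bor_natCast, two_mul_lor_one,
        PySem.Int.band_natCast, Nat.and_two_pow_sub_one_eq_mod]
      push_cast
      norm_cast
  · obtain ⟨m, rfl⟩ : ∃ m : Nat, v = -↑m - 1 := ⟨(-v-1).toNat, by omega⟩
    rcases hc with rfl | rfl
    · rw [PySem.Int.bor_zero,
        show 2 * (-(↑m:Int) - 1) = -↑(2 * m + 1) - 1 by push_cast; ring,
        bandneg K (2 * m + 1), Nat.and_two_pow_sub_one_eq_mod,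
        show (-(↑(2 * m + 1):Int) - 1 + 0) = -↑(2 * m + 1) - 1 by ring,
        (neg_ediv_emod (2 * m + 1) (2 ^ K) h1).2]
    · rw [show 2 * (-(↑m:Int) - 1) = -↑(2 * m + 1) - 1 by push_cast; ring,
        borneg1 m,
        show (2 * m + 1 - 1) = 2 * m by omega,
        bandneg K (2 * m), Nat.and_two_pow_sub_one_eq_mod,
        show (-(↑(2 * m + 1):Int) - 1) + 1 = -↑(2 * m) - 1 by push_cast; ring,
        (neg_ediv_emod (2 * m) (2 ^ K) h1).2]

lemma bxor_ne_zero (c h : Int) (hh : h = 0 ∨ h = 1) : PySem.Int.bxor c h ≠ 0 ↔ c ≠ h := by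
  rcases hh with rfl | rfl
  · simp [PySem.Int.bxor_zero]
  · suffices h : PySem.Int.bxor c 1 = 0 ↔ c = 1 by
      constructor
      · intro h1 h2; exact h1 (h.mpr h2)
      · intro h1 h2; exact h1 (h.mp h2)
    rcases le_or_gt 0 c with hv | hv
    · obtain ⟨n, rfl⟩ : ∃ n : Nat, c = ↑n := ⟨c.toNat, by omega⟩
      rw [show (1:Int) = ((1:Nat):Int) by norm_num, PySem.Int.bxor_natCast]
      constructor
      · intro h0
        have : n ^^^ 1 = 0 := by exact_mod_cast h0
        have := Nat.xor_eq_zero_iff.mp this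
        exact_mod_cast congrArg (Nat.cast : Nat → Int) this
      · intro h0
        have : n = 1 := by exact_mod_cast h0
        subst this
        norm_num
    · unfold PySem.Int.bxor
      rw [if_neg (by omega), if_pos (by norm_num)]
      omega

lemma stepEq (S K : Nat) : stepA (2 ^ S) ((2 ^ K : Int) - 1) = stepF (2 ^ S) (2 ^ K) := by
  funext s
  unfold stepA stepF
  rw [bitsel S s.1]
  rw [maskstep K s.1 _ ?_]
  · have h2 : (0:Int) < 2 := by norm_num
    have := PySem.Int.mod_nonneg (a := PySem.Int.floordiv s.1 (2 ^ S : Int)) h2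
    have := PySem.Int.mod_lt (a := PySem.Int.floordiv s.1 (2 ^ S : Int)) h2
    omega

-- loop characterization: n steps of gN rotate the relevant bits (n ≤ S+1)
lemma gN_formula (S K : Nat) (hSK : S < K) (v : Nat) (hv : v < 2 ^ K) :
    ∀ n, n ≤ S + 1 → (gN S K)^[n] v = v % 2 ^ (K - n) * 2 ^ n + v % 2 ^ (S + 1) / 2 ^ (S + 1 - n) := by
  intro n
  induction n with
  | zero =>
    intro _
    simp [Nat.mod_eq_of_lt hv,
      Nat.div_eq_of_lt (Nat.mod_lt v (pow_pos (by norm_num : (0:Nat) < 2) (S+1)))]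
  | succ n ih =>
    intro hn
    have hnS : n ≤ S := by omega
    rw [Function.iterate_succ_apply', ih (by omega)]
    set X := v % 2 ^ (K - n) with hXdef
    set w := v % 2 ^ (S + 1) / 2 ^ (S + 1 - n) with hwdef
    have hpow2 : (0:Nat) < 2 := by norm_num
    have hw : w < 2 ^ n := by
      rw [hwdef]
      rw [Nat.div_lt_iff_lt_mul (pow_pos hpow2 _)]
      calc v % 2 ^ (S + 1) < 2 ^ (S + 1) := Nat.mod_lt _ (pow_pos hpow2 _)
        _ = 2 ^ n * 2 ^ (S + 1 - n) := by rw [← pow_add]; congr 1; omega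
    -- the tested bit of the current state
    have f1 : (X * 2 ^ n + w) / 2 ^ S % 2 = v / 2 ^ (S - n) % 2 := by
      have e1 : (X * 2 ^ n + w) / 2 ^ S = X / 2 ^ (S - n) := by
        rw [show 2 ^ S = 2 ^ n * 2 ^ (S - n) by rw [← pow_add]; congr 1; omega,
          ← Nat.div_div_eq_div_mul,
          show X * 2 ^ n + w = w + X * 2 ^ n by ring,
          Nat.add_mul_div_right _ _ (pow_pos hpow2 n),
          Nat.div_eq_of_lt hw, Nat.zero_add]
      rw [e1, hXdef]
      exact bit_mod_pow v (K - n) (S - n) (by omega)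
    have f2 : v % 2 ^ (S + 1) / 2 ^ (S - n) = 2 * w + v / 2 ^ (S - n) % 2 := by
      have e1 : v % 2 ^ (S + 1) / 2 ^ (S - n) % 2 = v / 2 ^ (S - n) % 2 :=
        bit_mod_pow v (S + 1) (S - n) (by omega)
      have e2 : v % 2 ^ (S + 1) / 2 ^ (S - n) / 2 = w := by
        rw [Nat.div_div_eq_div_mul, hwdef]
        congr 1
        rw [← pow_succ]
        congr 1
        omega
      omega
    have f3 : X = v % 2 ^ (K - n - 1) + 2 ^ (K - n - 1) * (v / 2 ^ (K - n - 1) % 2) := by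
      rw [hXdef, show 2 ^ (K - n) = 2 ^ (K - n - 1) * 2 by rw [← pow_succ]; congr 1; omega]
      exact Nat.mod_mul
    -- compute the step
    show (2 * (X * 2 ^ n + w) + (X * 2 ^ n + w) / 2 ^ S % 2) % 2 ^ K = _
    rw [f1]
    set c := v / 2 ^ (S - n) % 2 with hcdef
    have e3 : 2 * (X * 2 ^ n + w) + c
        = (v % 2 ^ (K - n - 1) * 2 ^ (n + 1) + (2 * w + c)) + (v / 2 ^ (K - n - 1) % 2) * 2 ^ K := by
      rw [f3, show 2 ^ K = 2 ^ (K - n - 1) * 2 ^ (n + 1) by rw [← pow_add]; congr 1; omega]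
      ring
    rw [e3, Nat.add_mul_mod_self_right]
    have hb : 2 * w + c < 2 ^ (n + 1) := by
      have : c < 2 := Nat.mod_lt _ hpow2
      rw [pow_succ]
      omega
    have hA : v % 2 ^ (K - n - 1) + 1 ≤ 2 ^ (K - n - 1) :=
      Nat.mod_lt _ (pow_pos hpow2 _)
    have hT : v % 2 ^ (K - n - 1) * 2 ^ (n + 1) + (2 * w + c) < 2 ^ K := by
      have h5 : (v % 2 ^ (K - n - 1) + 1) * 2 ^ (n + 1) ≤ 2 ^ (K - n - 1) * 2 ^ (n + 1) :=
        Nat.mul_le_mul_right _ hA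
      rw [show 2 ^ (K - n - 1) * 2 ^ (n + 1) = 2 ^ K by rw [← pow_add]; congr 1; omega] at h5
      have h6 : (v % 2 ^ (K - n - 1) + 1) * 2 ^ (n + 1)
          = v % 2 ^ (K - n - 1) * 2 ^ (n + 1) + 2 ^ (n + 1) := by ring
      omega
    rw [Nat.mod_eq_of_lt hT]
    rw [show K - n - 1 = K - (n + 1) by omega, show S - n = S + 1 - (n + 1) by omega] at *
    rw [← f2]

lemma per16 (v : Nat) (hv : v < 2 ^ 16) : (gN 15 16)^[16] v = v := by
  rw [gN_formula 15 16 (by omega) v hv 16 (by omega)]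
  norm_num
  omega

lemma per8 (v : Nat) (hv : v < 2 ^ 8) : (gN 7 8)^[8] v = v := by
  rw [gN_formula 7 8 (by omega) v hv 8 (by omega)]
  norm_num
  omega

lemma perW (v : Nat) (hv : v < 2 ^ 16) : (gN 7 16)^[8] v = v % 256 * 257 := by
  rw [gN_formula 7 16 (by omega) v hv 8 (by omega)]
  norm_num
  omega

lemma idem16 : ∀ w < 2 ^ 16, (gN 15 16)^[16] ((gN 15 16)^[16] w) = (gN 15 16)^[16] w := by
  intro w hw; rw [per16 w hw, per16 w hw]

lemma idem8 : ∀ w < 2 ^ 8, (gN 7 8)^[16] ((gN 7 8)^[16] w) = (gN 7 8)^[16] w := by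
  intro w hw
  have h16 : ∀ u, u < 2 ^ 8 → (gN 7 8)^[16] u = u := by
    intro u hu
    have : (16 : Nat) = 8 + 8 := by norm_num
    rw [this, Function.iterate_add_apply, per8 u hu, per8 u hu]
  rw [h16 w hw, h16 w hw]

lemma idemW : ∀ w < 2 ^ 16, (gN 7 16)^[16] ((gN 7 16)^[16] w) = (gN 7 16)^[16] w := by
  intro w hw
  have h16 : ∀ u, u < 2 ^ 16 → (gN 7 16)^[16] u = u % 256 * 257 := by
    intro u hu
    have e : (16 : Nat) = 8 + 8 := by norm_num
    have h8 : u % 256 * 257 < 2 ^ 16 := by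
      have := Nat.mod_lt u (show 0 < 256 by norm_num); omega
    rw [e, Function.iterate_add_apply, perW u hu, perW _ h8]
    have : u % 256 * 257 % 256 = u % 256 := by omega
    rw [this]
  have hlt : (gN 7 16)^[16] w < 2 ^ 16 := by
    rw [h16 w hw]; have := Nat.mod_lt w (show 0 < 256 by norm_num); omega
  rw [h16 _ hlt, h16 w hw]
  have := Nat.mod_lt w (show 0 < 256 by norm_num)
  omega

-- count reduction: past 16 steps the state is periodic with period 16
lemma gN_red (S K : Nat)
    (hid : ∀ w < 2 ^ K, (gN S K)^[16] ((gN S K)^[16] w) = (gN S K)^[16] w) :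
    ∀ j₁ j₂ (m : Nat), m < 2 ^ K → 16 ≤ j₁ → 16 ≤ j₂ → j₁ % 16 = j₂ % 16 →
      (gN S K)^[j₁] m = (gN S K)^[j₂] m := by
  have canon : ∀ j m, m < 2 ^ K → 16 ≤ j → (gN S K)^[j] m = (gN S K)^[16 + (j - 16) % 16] m := by
    intro j
    induction j using Nat.strong_induction_on with
    | _ j IH =>
      intro m hm h16
      by_cases h32 : j < 32
      · have : 16 + (j - 16) % 16 = j := by omega
        rw [this]
      · have e1 : (gN S K)^[j] m = (gN S K)^[j - 32] ((gN S K)^[16] ((gN S K)^[16] m)) := by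
          rw [← Function.iterate_add_apply, ← Function.iterate_add_apply]
          congr 1; omega
        rw [hid m hm] at e1
        have e2 : (gN S K)^[j - 16] m = (gN S K)^[j - 32] ((gN S K)^[16] m) := by
          rw [← Function.iterate_add_apply]; congr 1; omega
        rw [e1, ← e2, IH (j - 16) (by omega) m hm (by omega)]
        congr 2; omega
  intro j₁ j₂ m hm h1 h2 hmod
  rw [canon j₁ m hm h1, canon j₂ m hm h2]
  congr 2; omega

-- one B step on a Nat-valued state
lemma stepF_cast (S K : Nat) (m : Nat) (c : Int) :
    stepF (2 ^ S) (2 ^ K) (↑m, c) = (↑(gN S K m), ↑(m / 2 ^ S % 2)) := by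
  unfold stepF gN
  have e1 : PySem.Int.floordiv (↑m) ((2:Int) ^ S) = ↑(m / 2 ^ S) := by
    rw [show ((2:Int) ^ S) = ((2 ^ S : Nat) : Int) by push_cast; ring]
    exact PySem.Int.floordiv_natCast m (2 ^ S)
  have e2 : PySem.Int.mod (↑(m / 2 ^ S)) 2 = ↑(m / 2 ^ S % 2) := by
    rw [show (2:Int) = ((2 : Nat) : Int) by norm_num]
    exact PySem.Int.mod_natCast (m / 2 ^ S) 2
  simp only [e1, e2, Prod.mk.injEq]
  refine ⟨?_, trivial⟩
  rw [show (2 * (m:Int) + ((m / 2 ^ S % 2 : Nat) : Int)) = ((2 * m + m / 2 ^ S % 2 : Nat) : Int) by push_cast; ring,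
    show ((2:Int) ^ K) = ((2 ^ K : Nat) : Int) by push_cast; ring]
  exact PySem.Int.mod_natCast _ _

-- iterating B's step on a Nat-valued state
lemma iterF (S K : Nat) (m : Nat) (c : Int) :
    ∀ j, (stepF (2 ^ S) (2 ^ K))^[j + 1] (↑m, c)
      = (↑((gN S K)^[j + 1] m), ↑((gN S K)^[j] m / 2 ^ S % 2)) := by
  intro j
  induction j with
  | zero => simp [stepF_cast]
  | succ j ih =>
    rw [Function.iterate_succ_apply', ih, stepF_cast,
      ← Function.iterate_succ_apply' (gN S K) (j + 1)]

lemma iterF_congr (S K : Nat)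
    (hid : ∀ w < 2 ^ K, (gN S K)^[16] ((gN S K)^[16] w) = (gN S K)^[16] w)
    (m : Nat) (hm : m < 2 ^ K) (c : Int) (j₁ j₂ : Nat)
    (h1 : 16 ≤ j₁) (h2 : 16 ≤ j₂) (hmod : j₁ % 16 = j₂ % 16) :
    (stepF (2 ^ S) (2 ^ K))^[j₁ + 1] (↑m, c) = (stepF (2 ^ S) (2 ^ K))^[j₂ + 1] (↑m, c) := by
  rw [iterF, iterF,
    gN_red S K hid j₁ j₂ m hm h1 h2 hmod,
    gN_red S K hid (j₁ + 1) (j₂ + 1) m hm (by omega) (by omega) (by omega)]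

-- the first B step lands in [0, 2^K)
lemma stepF_first (S K : Nat) (x : Int × Int) :
    ∃ m : Nat, m < 2 ^ K ∧ (stepF (2 ^ S) (2 ^ K) x).1 = ↑m := by
  have hpos : (0:Int) < 2 ^ K := by positivity
  refine ⟨((stepF (2 ^ S) (2 ^ K) x).1).toNat, ?_, ?_⟩
  · have hlt := PySem.Int.mod_lt (a := 2 * x.1 + PySem.Int.mod (PySem.Int.floordiv x.1 (2 ^ S)) 2) hpos
    have : ((2:Int) ^ K) = ((2 ^ K : Nat) : Int) := by push_cast; ring
    unfold stepF
    omega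
  · have hnn := PySem.Int.mod_nonneg (a := 2 * x.1 + PySem.Int.mod (PySem.Int.floordiv x.1 (2 ^ S)) 2) hpos
    unfold stepF
    omega

-- equal loop states for the two iteration counts B may use
lemma iter_reduce (S K : Nat)
    (hid : ∀ w < 2 ^ K, (gN S K)^[16] ((gN S K)^[16] w) = (gN S K)^[16] w)
    (x : Int × Int) (N₁ N₂ : Nat)
    (h1 : 18 ≤ N₁) (h2 : 18 ≤ N₂) (hmod : N₁ % 16 = N₂ % 16) :
    (stepF (2 ^ S) (2 ^ K))^[N₁] x = (stepF (2 ^ S) (2 ^ K))^[N₂] x := by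
  obtain ⟨m, hm, hx1⟩ := stepF_first S K x
  have e1 : N₁ = (N₁ - 2) + 1 + 1 := by omega
  have e2 : N₂ = (N₂ - 2) + 1 + 1 := by omega
  have key : ∀ N : Nat, (stepF (2 ^ S) (2 ^ K))^[N - 2 + 1 + 1] x
      = (stepF (2 ^ S) (2 ^ K))^[N - 2 + 1] (↑m, (stepF (2 ^ S) (2 ^ K) x).2) := by
    intro N
    rw [Function.iterate_add_apply _ _ 1, Function.iterate_one]
    congr 1
    rw [← hx1]
  rw [e1, e2, key N₁, key N₂]
  exact iterF_congr S K hid m hm _ (N₁ - 2) (N₂ - 2) (by omega) (by omega) (by omega)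

-- ===== assembly =====

-- equality of the two tails, given equal loop states
lemma tailEq (S : Nat) (st : Int × Int) (sf : Bool) :
    [st.1, (if st.2 ≠ 0 then 1 else 0) +
        (if (if sf then (PySem.Int.bxor st.2 (if PySem.Int.band st.1 ((2:Int) ^ S) ≠ 0 then 1 else 0), Int.not 0)
             else ((0:Int), Int.not 2048)).1 ≠ 0 then (2048:Int) else 0),
      PySem.Int.band (if sf then (PySem.Int.bxor st.2 (if PySem.Int.band st.1 ((2:Int) ^ S) ≠ 0 then 1 else 0), Int.not 0)
             else ((0:Int), Int.not 2048)).2 65535]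
    = [st.1, (if st.2 ≠ 0 then 1 else 0) +
        (if sf ∧ st.2 ≠ PySem.Int.mod (PySem.Int.floordiv st.1 ((2:Int) ^ S)) 2 then 2048 else 0),
      if sf then 65535 else 63487] := by
  cases sf
  · simp only [Bool.false_eq_true, if_false, false_and]
    norm_num
    decide
  · simp only [if_true, true_and]
    rw [bitsel S st.1]
    have hpos : (0:Int) < 2 := by norm_num
    have h0 := PySem.Int.mod_nonneg (a := PySem.Int.floordiv st.1 ((2:Int) ^ S)) hpos
    have h1 := PySem.Int.mod_lt (a := PySem.Int.floordiv st.1 ((2:Int) ^ S)) hpos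
    rw [if_congr (bxor_ne_zero st.2 _ (by omega)) rfl rfl]
    norm_num
    decide

lemma main_gen (val count carry : Int) (sf : Bool) (width : Int) (S K : Nat)
    (hcb : (if width = 16 then (32768:Int) else 128) = 2 ^ S)
    (hmask : (if width = 8 then (255:Int) else 65535) = 2 ^ K - 1)
    (hsize : (if width = 8 then (256:Int) else 65536) = 2 ^ K)
    (hidem : ∀ w < 2 ^ K, (gN S K)^[16] ((gN S K)^[16] w) = (gN S K)^[16] w) :
    flags_rol val count carry width sf = flags_rol_alt val count carry width sf := by
  unfold flags_rol flags_rol_alt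
  simp only [hcb, hmask, hsize]
  rw [loopA, loopB, PySem.List.length_pyRange_one, List.length_range, stepEq S K]
  rcases le_or_gt count 32 with hc | hc
  · have hnval : (if count ≤ 32 then count else 32 + PySem.Int.mod (count - 32) 16) = count :=
      if_pos hc
    rw [hnval, show count - 0 = count by ring]
    exact tailEq S _ sf
  · have hnval : (if count ≤ 32 then count else 32 + PySem.Int.mod (count - 32) 16)
        = 32 + PySem.Int.mod (count - 32) 16 := if_neg (by omega)
    rw [hnval, show count - 0 = count by ring]
    have hcN : count = ((count.toNat : Nat) : Int) := by omega
    set cN := count.toNat with hcNdef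
    have hsub : count - 32 = ((cN - 32 : Nat) : Int) := by omega
    have hmod : PySem.Int.mod ((cN - 32 : Nat) : Int) 16 = (((cN - 32) % 16 : Nat) : Int) := by
      rw [show (16:Int) = ((16:Nat):Int) by norm_num]
      exact PySem.Int.mod_natCast _ _
    have hn : (32 + PySem.Int.mod (count - 32) 16).toNat = 32 + (cN - 32) % 16 := by
      rw [hsub, hmod]; omega
    rw [hn]
    rw [iter_reduce S K hidem (val, carry) cN (32 + (cN - 32) % 16)
      (by omega) (by omega) (by omega)]
    exact tailEq S _ sf

theorem flags_rol_spec : Claim_equal_flags_rol := by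
  intro val count carry width sf _
  unfold Spec_flags_rol
  by_cases h16 : width = 16
  · subst h16
    exact main_gen val count carry sf 16 15 16 (by norm_num) (by norm_num)
      (by norm_num) idem16
  by_cases h8 : width = 8
  · subst h8
    exact main_gen val count carry sf 8 7 8 (by norm_num) (by norm_num)
      (by norm_num) idem8
  · exact main_gen val count carry sf width 7 16 (by rw [if_neg h16]; norm_num)
      (by rw [if_neg h8]; norm_num) (by rw [if_neg h8]; norm_num) idemW
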